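-- pv_equiv track=rewrite | github.com/gitlost-murali/t5ner | conll/make_t5_template.py | templatize_function
-- ===== SOURCE A (Python) =====
-- tag_descriptor = {
-- "ORG": "Organization",
-- "PER": "Person",
-- "LOC": "Location",
-- "MISC": "Miscellaneous Entity"
-- }
--
-- def templatize_function(sentence_text, entity_text, entity_tags, template_type):
--     """
--     Sentence Text: Normal textual sentence
--     Entity Text: ['London', 'Iraq', 'British'],
--     Entity Tags: ['Geographical Entity', 'Geographical Entity', 'Geopolitical Entity']
--     """
--
--     if template_type == 1:
--         target_template = ""
--         input_template = f"ner: {sentence_text}"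
--         for ent, tg in zip(entity_text, entity_tags):
--             target_template += f"{ent} [{tg}] "
--
--         target_template = target_template.strip()
--         target_template = [target_template]
--         input_template = [input_template]
--
--     if template_type == 2:
--         input_template = []
--         target_template = []
--         ents_per_tok = dict()
--         ## Create a bucket that stores entities per tag
--         for tag, tok in zip(entity_tags, entity_text):
--             ents_per_tok[tag] = ents_per_tok.get(tag, []) + [tok]
--
--         tagnames = []
--         for tagname, dscr in tag_descriptor.items():
--             input_template.append(f"ner: {sentence_text}, the '{dscr}' entities in the sentence are ")
--             if tagname in entity_tags:
--                 target_template.append(f"{ ', '.join(ents_per_tok.get(tagname, 'None')) }")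
--             else:
--                 target_template.append("None")
--
--             tagnames.append(tagname)
--
--     return input_template, target_template, tagnames
-- ===== SOURCE B (Python) =====
-- tag_descriptor = {
-- "ORG": "Organization",
-- "PER": "Person",
-- "LOC": "Location",
-- "MISC": "Miscellaneous Entity"
-- }
--
-- def templatize_function(sentence_text, entity_text, entity_tags, template_type):
--     if template_type != 2:
--         raise ValueError(f"unsupported template_type: {template_type}")
--     pairs = list(zip(entity_text, entity_tags))
--     input_template = [f"ner: {sentence_text}, the '{dscr}' entities in the sentence are "
--                       for dscr in tag_descriptor.values()]
--     target_template = []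
--     for tagname in tag_descriptor:
--         toks = [tok for tok, tg in pairs if tg == tagname]
--         target_template.append(", ".join(toks) if toks else "None")
--     tagnames = list(tag_descriptor)
--     return input_template, target_template, tagnames
-- ===== Notes on version B (the rewrite author's own statement) =====
-- stated objective: simpler
-- what changed: The template-2 path drops the ents_per_tok grouping dict and the per-tag membership test: each tag's entities are collected directly by filtering the zipped (token, tag) pairs, and the three result lists are built independently; non-2 template types, where A dies with UnboundLocalError, raise an explicit ValueError in B.
-- intended difference: When a descriptor tag (ORG/PER/LOC/MISC) occurs in entity_tags only at positions beyond len(entity_text) (zip truncation), A's ents_per_tok.get(tag, 'None') falls back to the string 'None' and ', '.join yields the garbled 'N, o, n, e' in that slot, while B returns 'None', the value A's own else-branch intends for a tag with no collected entities. — e.g. on templatize_function("hi", [], ["ORG"], 2): A returns (["ner: hi, the 'Organization' entities in the sentence are ", "ner: hi, the 'Person' entities in the sentence are ", "…, B returns (["ner: hi, the 'Organization' entities in the sentence are ", "ner: hi, the 'Person' entities in the sentence are ", "…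
import Mathlib
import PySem

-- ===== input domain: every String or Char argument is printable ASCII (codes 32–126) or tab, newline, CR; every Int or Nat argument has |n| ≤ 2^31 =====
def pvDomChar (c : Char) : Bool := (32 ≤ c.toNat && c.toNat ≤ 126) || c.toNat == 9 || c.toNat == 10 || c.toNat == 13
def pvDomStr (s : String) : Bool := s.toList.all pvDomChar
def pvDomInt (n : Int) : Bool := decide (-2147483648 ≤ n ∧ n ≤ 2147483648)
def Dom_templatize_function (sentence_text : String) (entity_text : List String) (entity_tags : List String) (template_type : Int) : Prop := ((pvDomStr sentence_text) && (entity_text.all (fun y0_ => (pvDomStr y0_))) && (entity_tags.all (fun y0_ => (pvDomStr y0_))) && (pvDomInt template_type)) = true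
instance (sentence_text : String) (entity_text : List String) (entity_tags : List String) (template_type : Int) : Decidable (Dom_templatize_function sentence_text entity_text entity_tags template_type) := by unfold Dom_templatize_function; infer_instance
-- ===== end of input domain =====

-- B drops A's ents_per_tok grouping dict: each tag's entities are collected by filtering the
-- zipped (token, tag) pairs and the three result lists are built independently (objective: simpler).

-- tag_descriptor (module-level dict, in insertion order)
def tagDescriptor : List (String × String) :=
  [("ORG", "Organization"), ("PER", "Person"), ("LOC", "Location"), ("MISC", "Miscellaneous Entity")]

-- ===== PORT A =====
-- The template_type == 1 branch of A (and any other template_type ≠ 2) raises UnboundLocalError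
-- at the final return ('tagnames' resp. 'input_template' never assigned); those inputs are outside
-- Pre_, so the else-arm value here is never claimed about.
-- ', '.join(ents_per_tok.get(tagname, 'None')): the string default 'None' is iterated char by char
-- by join, so it is modelled exactly by the list ["N", "o", "n", "e"].
def templatize_function (sentence_text : String) (entity_text : List String) (entity_tags : List String) (template_type : Int) : List String × List String × List String :=
  if template_type == 2 then
    let ents_per_tok : PySem.Dict String (List String) :=
      (List.zip entity_tags entity_text).foldl
        (fun d p => d.insert p.1 (d.getD p.1 [] ++ [p.2])) PySem.Dict.empty
    tagDescriptor.foldl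
      (fun (acc : List String × List String × List String) p =>
        (acc.1 ++ ["ner: " ++ sentence_text ++ ", the '" ++ p.2 ++ "' entities in the sentence are "],
         acc.2.1 ++ [if entity_tags.contains p.1 then
             PySem.Str.join ", " (ents_per_tok.getD p.1 ["N", "o", "n", "e"])
           else "None"],
         acc.2.2 ++ [p.1]))
      ([], [], [])
  else ([], [], [])

-- ===== PORT B =====
-- B raises ValueError for template_type ≠ 2 (outside Pre_); the else-arm value is never claimed about.
def templatize_function_alt (sentence_text : String) (entity_text : List String) (entity_tags : List String) (template_type : Int) : List String × List String × List String :=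
  if template_type == 2 then
    let pairs := List.zip entity_text entity_tags
    (tagDescriptor.map (fun p => "ner: " ++ sentence_text ++ ", the '" ++ p.2 ++ "' entities in the sentence are "),
     tagDescriptor.map (fun p =>
       let toks := (pairs.filter (fun q => q.2 == p.1)).map Prod.fst
       if toks.isEmpty then "None" else PySem.Str.join ", " toks),
     tagDescriptor.map Prod.fst)
  else ([], [], [])

-- ===== PRECONDITION & SPEC =====
-- Pre_ excludes exactly the inputs where A raises: for any template_type ≠ 2 (including 1) A's
-- final 'return input_template, target_template, tagnames' hits a never-assigned local and raises
-- UnboundLocalError, so A returns only for template_type == 2.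
def Pre_templatize_function (sentence_text : String) (entity_text : List String) (entity_tags : List String) (template_type : Int) : Prop :=
  template_type = 2
instance (sentence_text : String) (entity_text : List String) (entity_tags : List String) (template_type : Int) : Decidable (Pre_templatize_function sentence_text entity_text entity_tags template_type) := by unfold Pre_templatize_function; infer_instance

def pvWitness_templatize_function : String × List String × List String × Int :=
  ("hi", ["a"], ["ORG"], 2)

-- When a descriptor tag (ORG/PER/LOC/MISC) occurs in entity_tags only at positions beyond
-- len(entity_text) (zip truncation), A returns the garbled 'N, o, n, e' in that tag's slot
-- (', '.join over the string default 'None'), while B returns 'None' — the value A's own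
-- else-branch intends for a tag with no collected entities.
def D_templatize_function (sentence_text : String) (entity_text : List String) (entity_tags : List String) (template_type : Int) : Prop :=
  template_type = 2 ∧ ∃ tg ∈ (["ORG", "PER", "LOC", "MISC"] : List String),
    tg ∈ entity_tags.drop entity_text.length ∧ tg ∉ entity_tags.take entity_text.length
instance (sentence_text : String) (entity_text : List String) (entity_tags : List String) (template_type : Int) : Decidable (D_templatize_function sentence_text entity_text entity_tags template_type) := by unfold D_templatize_function; infer_instance

def Spec_templatize_function (sentence_text : String) (entity_text : List String) (entity_tags : List String) (template_type : Int) (out : List String × List String × List String) : Prop := ¬ D_templatize_function sentence_text entity_text entity_tags template_type → out = templatize_function_alt sentence_text entity_text entity_tags template_type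
instance (sentence_text : String) (entity_text : List String) (entity_tags : List String) (template_type : Int) (out : List String × List String × List String) : Decidable (Spec_templatize_function sentence_text entity_text entity_tags template_type out) := by unfold Spec_templatize_function; infer_instance

def pvDiffWitness_templatize_function : String × List String × List String × Int :=
  ("hi", [], ["ORG"], 2)
def pvDiffWitnessOut_templatize_function : (List String × List String × List String) × (List String × List String × List String) :=
  ((["ner: hi, the 'Organization' entities in the sentence are ",
     "ner: hi, the 'Person' entities in the sentence are ",
     "ner: hi, the 'Location' entities in the sentence are ",
     "ner: hi, the 'Miscellaneous Entity' entities in the sentence are "],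
    ["N, o, n, e", "None", "None", "None"],
    ["ORG", "PER", "LOC", "MISC"]),
   (["ner: hi, the 'Organization' entities in the sentence are ",
     "ner: hi, the 'Person' entities in the sentence are ",
     "ner: hi, the 'Location' entities in the sentence are ",
     "ner: hi, the 'Miscellaneous Entity' entities in the sentence are "],
    ["None", "None", "None", "None"],
    ["ORG", "PER", "LOC", "MISC"]))

-- ===== CLAIM (what is proved, stated in full; the proofs are below) =====
def Claim_unchanged_templatize_function : Prop := ∀ (sentence_text : String) (entity_text : List String) (entity_tags : List String) (template_type : Int), Dom_templatize_function sentence_text entity_text entity_tags template_type → Pre_templatize_function sentence_text entity_text entity_tags template_type → Spec_templatize_function sentence_text entity_text entity_tags template_type (templatize_function sentence_text entity_text entity_tags template_type)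
def Claim_changed_templatize_function : Prop := Dom_templatize_function (pvDiffWitness_templatize_function.1) (pvDiffWitness_templatize_function.2.1) (pvDiffWitness_templatize_function.2.2.1) (pvDiffWitness_templatize_function.2.2.2) ∧ Pre_templatize_function (pvDiffWitness_templatize_function.1) (pvDiffWitness_templatize_function.2.1) (pvDiffWitness_templatize_function.2.2.1) (pvDiffWitness_templatize_function.2.2.2) ∧ D_templatize_function (pvDiffWitness_templatize_function.1) (pvDiffWitness_templatize_function.2.1) (pvDiffWitness_templatize_function.2.2.1) (pvDiffWitness_templatize_function.2.2.2) ∧ templatize_function (pvDiffWitness_templatize_function.1) (pvDiffWitness_templatize_function.2.1) (pvDiffWitness_templatize_function.2.2.1) (pvDiffWitness_templatize_function.2.2.2) = pvDiffWitnessOut_templatize_function.1 ∧ templatize_function_alt (pvDiffWitness_templatize_function.1) (pvDiffWitness_templatize_function.2.1) (pvDiffWitness_templatize_function.2.2.1) (pvDiffWitness_templatize_function.2.2.2) = pvDiffWitnessOut_templatize_function.2 ∧ pvDiffWitnessOut_templatize_function.1 ≠ pvDiffWitnessOut_templatize_function.2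
def Claim_exact_templatize_function : Prop := ∀ (sentence_text : String) (entity_text : List String) (entity_tags : List String) (template_type : Int), Dom_templatize_function sentence_text entity_text entity_tags template_type → Pre_templatize_function sentence_text entity_text entity_tags template_type → D_templatize_function sentence_text entity_text entity_tags template_type → templatize_function sentence_text entity_text entity_tags template_type ≠ templatize_function_alt sentence_text entity_text entity_tags template_type

-- ===== LEMMAS AND PROOFS =====

-- entities grouped under key k, in zip order
def grpTag (k : String) (L : List (String × String)) : List String :=
  (L.filter (fun p => p.1 == k)).map Prod.snd

theorem fold_insert_get? (L : List (String × String)) (d : PySem.Dict String (List String)) (k : String) :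
    (L.foldl (fun d p => d.insert p.1 (d.getD p.1 [] ++ [p.2])) d).get? k =
      if grpTag k L = [] then d.get? k else some (d.getD k [] ++ grpTag k L) := by
  induction L generalizing d with
  | nil => simp [grpTag]
  | cons p L ih =>
    simp only [List.foldl_cons]
    rw [ih]
    by_cases hp : p.1 = k
    · subst hp
      have hg : grpTag p.1 (p :: L) = p.2 :: grpTag p.1 L := by simp [grpTag]
      have h1 : (d.insert p.1 (d.getD p.1 [] ++ [p.2])).get? p.1 = some (d.getD p.1 [] ++ [p.2]) :=
        PySem.Dict.get?_insert_self ..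
      have h2 : (d.insert p.1 (d.getD p.1 [] ++ [p.2])).getD p.1 [] = d.getD p.1 [] ++ [p.2] :=
        PySem.Dict.getD_insert_self ..
      rw [hg, h1, h2]
      by_cases hgl : grpTag p.1 L = []
      · simp [hgl]
      · simp [hgl]
    · have hg : grpTag k (p :: L) = grpTag k L := by
        simp [grpTag, show (p.1 == k) = false from beq_eq_false_iff_ne.2 hp]
      have h1 : (d.insert p.1 (d.getD p.1 [] ++ [p.2])).get? k = d.get? k :=
        PySem.Dict.get?_insert_of_ne _ _ (Ne.symm hp)
      have h2 : (d.insert p.1 (d.getD p.1 [] ++ [p.2])).getD k [] = d.getD k [] :=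
        PySem.Dict.getD_insert_of_ne _ _ _ (Ne.symm hp)
      rw [hg, h1, h2]

theorem toks_eq_grp (ents tags : List String) (k : String) :
    ((List.zip ents tags).filter (fun q => q.2 == k)).map Prod.fst = grpTag k (List.zip tags ents) := by
  induction ents generalizing tags with
  | nil => cases tags <;> simp [grpTag]
  | cons e es ih =>
    cases tags with
    | nil => simp [grpTag]
    | cons t ts =>
      simp only [List.zip_cons_cons, List.filter_cons, grpTag] at *
      by_cases h : t = k
      · simp [h, ← ih ts]
      · simp [show (t == k) = false from beq_eq_false_iff_ne.2 h, ← ih ts]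

theorem grp_zip_eq_nil_iff (tags ents : List String) (k : String) :
    grpTag k (List.zip tags ents) = [] ↔ k ∉ tags.take ents.length := by
  have hfst : (List.zip tags ents).map Prod.fst = tags.take ents.length := by
    induction tags generalizing ents with
    | nil => simp
    | cons t ts ih => cases ents with
      | nil => simp
      | cons e es => simp [ih es]
  constructor
  · intro h hk
    rw [← hfst] at hk
    obtain ⟨p, hp, hpk⟩ := List.mem_map.1 hk
    have : p ∈ (List.zip tags ents).filter (fun p => p.1 == k) :=
      List.mem_filter.2 ⟨hp, by simp [hpk]⟩
    rw [show (List.zip tags ents).filter (fun p => p.1 == k) = [] from by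
      simpa [grpTag] using h] at this
    exact absurd this (List.not_mem_nil)
  · intro h
    simp only [grpTag, List.map_eq_nil_iff, List.filter_eq_nil_iff]
    intro p hp
    simp only [beq_iff_eq]
    intro hpk
    exact h (hfst ▸ List.mem_map.2 ⟨p, hp, hpk⟩)

-- abbreviations for the per-tag slot expressions of the two ports (proof-only helpers)
def slotA (ents tags : List String) (k : String) : String :=
  if tags.contains k then
    PySem.Str.join ", "
      (((List.zip tags ents).foldl (fun d p => d.insert p.1 (d.getD p.1 [] ++ [p.2]))
          PySem.Dict.empty).getD k ["N", "o", "n", "e"])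
  else "None"

def slotB (ents tags : List String) (k : String) : String :=
  let toks := ((List.zip ents tags).filter (fun q => q.2 == k)).map Prod.fst
  if toks.isEmpty then "None" else PySem.Str.join ", " toks

theorem portA_eq (s : String) (ents tags : List String) :
    templatize_function s ents tags 2 =
      (tagDescriptor.map (fun p => "ner: " ++ s ++ ", the '" ++ p.2 ++ "' entities in the sentence are "),
       tagDescriptor.map (fun p => slotA ents tags p.1),
       tagDescriptor.map Prod.fst) := rfl

theorem portB_eq (s : String) (ents tags : List String) :
    templatize_function_alt s ents tags 2 =
      (tagDescriptor.map (fun p => "ner: " ++ s ++ ", the '" ++ p.2 ++ "' entities in the sentence are "),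
       tagDescriptor.map (fun p => slotB ents tags p.1),
       tagDescriptor.map Prod.fst) := rfl

theorem slotA_getD (ents tags : List String) (k : String) :
    ((List.zip tags ents).foldl (fun d p => d.insert p.1 (d.getD p.1 [] ++ [p.2]))
        PySem.Dict.empty).getD k ["N", "o", "n", "e"] =
      if grpTag k (List.zip tags ents) = [] then ["N", "o", "n", "e"]
      else grpTag k (List.zip tags ents) := by
  have hbridge : ∀ (d : PySem.Dict String (List String)) (v : List String),
      d.getD k v = (d.get? k).getD v := fun _ _ => rfl
  rw [hbridge, fold_insert_get?]
  by_cases hg : grpTag k (List.zip tags ents) = [] <;>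
    simp [hg, PySem.Dict.get?_empty, show (PySem.Dict.empty : PySem.Dict String (List String)).getD k [] = [] from rfl]

theorem slot_eq (ents tags : List String) (k : String)
    (h : k ∈ tags.drop ents.length → k ∈ tags.take ents.length) :
    slotA ents tags k = slotB ents tags k := by
  unfold slotA slotB
  rw [toks_eq_grp, slotA_getD]
  by_cases hg : grpTag k (List.zip tags ents) = []
  · have htake : k ∉ tags.take ents.length := (grp_zip_eq_nil_iff tags ents k).1 hg
    have hmem : k ∉ tags := by
      intro hk
      rw [← List.take_append_drop ents.length tags, List.mem_append] at hk
      rcases hk with hk | hk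
      · exact htake hk
      · exact htake (h hk)
    simp [hg, hmem]
  · have htake : k ∈ tags.take ents.length := by
      by_contra hc; exact hg ((grp_zip_eq_nil_iff tags ents k).2 hc)
    have hmem : k ∈ tags := List.mem_of_mem_take htake
    simp [hg, hmem]

theorem slotA_garbled (ents tags : List String) (k : String)
    (hk : k ∈ tags) (hg : grpTag k (List.zip tags ents) = []) :
    slotA ents tags k = "N, o, n, e" := by
  unfold slotA
  rw [slotA_getD, if_pos hg, if_pos (by simpa using hk)]
  decide

theorem slotB_none (ents tags : List String) (k : String)
    (hg : grpTag k (List.zip tags ents) = []) :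
    slotB ents tags k = "None" := by
  unfold slotB
  rw [toks_eq_grp, hg]
  rfl

theorem tag_mem_names (p : String × String) (hp : p ∈ tagDescriptor) :
    p.1 ∈ (["ORG", "PER", "LOC", "MISC"] : List String) := by
  fin_cases hp <;> simp

theorem templatize_function_spec : Claim_unchanged_templatize_function := by
  intro s ents tags t _hDom hPre hnD
  have ht : t = 2 := hPre
  subst ht
  show templatize_function s ents tags 2 = templatize_function_alt s ents tags 2
  rw [portA_eq, portB_eq]
  simp only [Prod.mk.injEq]
  refine ⟨trivial, ?_, trivial⟩
  refine List.map_congr_left (fun p hp => ?_)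
  refine slot_eq ents tags p.1 (fun hdrop => ?_)
  by_contra htake
  exact hnD ⟨rfl, p.1, tag_mem_names p hp, hdrop, htake⟩

theorem templatize_function_changed : Claim_changed_templatize_function := by
  unfold Claim_changed_templatize_function; decide

theorem templatize_function_tight : Claim_exact_templatize_function := by
  intro s ents tags t _hDom hPre hD heq
  have ht : t = 2 := hPre
  subst ht
  obtain ⟨-, k, hk, hdrop, htake⟩ := hD
  rw [portA_eq, portB_eq] at heq
  have h2 : tagDescriptor.map (fun p => slotA ents tags p.1) =
      tagDescriptor.map (fun p => slotB ents tags p.1) := congrArg (fun r => r.2.1) heq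
  have hmem : k ∈ tags := List.mem_of_mem_drop hdrop
  have hg : grpTag k (List.zip tags ents) = [] := (grp_zip_eq_nil_iff tags ents k).2 htake
  have hbad : slotA ents tags k = slotB ents tags k := by
    simp only [tagDescriptor, List.map_cons, List.map_nil, List.cons.injEq, and_true] at h2
    fin_cases hk
    · exact h2.1
    · exact h2.2.1
    · exact h2.2.2.1
    · exact h2.2.2.2
  rw [slotA_garbled ents tags k hmem hg, slotB_none ents tags k hg] at hbad
  exact absurd hbad (by decide)
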